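-- pv_equiv track=rewrite | github.com/TAUSEEF-01/CSE_2202_2212_Algorithm_1 | coinChange.py | min_coins_finite_supply
-- ===== SOURCE A (Python) =====
-- def min_coins_finite_supply(coins, counts, K):
--     """
--     Finds minimum number of coins needed to make amount K with finite supply
--     Using Dynamic Programming with coin counts
--     Time Complexity: O(n*K*max(counts)) where n is number of coin types
--     Space Complexity: O(K)
--     """
--     dp = [float('inf')] * (K + 1)
--     dp[0] = 0
--
--     for coin, count in zip(coins, counts):
--         for amount in range(K, -1, -1):
--             for used in range(1, count + 1):
--                 if amount >= used * coin:
--                     if dp[amount - used * coin] != float('inf'):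
--                         dp[amount] = min(dp[amount], dp[amount - used * coin] + used)
--
--     return dp[K] if dp[K] != float('inf') else -1
-- ===== SOURCE B (Python) =====
-- def min_coins_finite_supply(coins, counts, K):
--     """Bounded-knapsack min-coins via binary decomposition of each supply:
--     each (coin, count) is split into 0/1 items worth p*coin costing p coins,
--     p in {1,2,4,...,rest}, so the inner work is O(K*log(count)) per coin type."""
--     INF = float('inf')
--     dp = [INF] * (K + 1)
--     dp[0] = 0
--     for coin, count in zip(coins, counts):
--         c = count
--         p = 1
--         pieces = []
--         while p <= c:
--             pieces.append(p)
--             c -= p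
--             p *= 2
--         if c > 0:
--             pieces.append(c)
--         for q in pieces:
--             w = q * coin
--             for amount in range(K, w - 1, -1):
--                 prev = dp[amount - w]
--                 if prev != INF and prev + q < dp[amount]:
--                     dp[amount] = prev + q
--     return dp[K] if dp[K] != INF else -1
-- ===== Notes on version B (the rewrite author's own statement) =====
-- stated objective: faster
-- what changed: Replaced the inner 'used = 1..count' scan per amount by a binary decomposition of each coin's supply into 0/1 items (1,2,4,...,remainder), turning the O(n*K*max(count)) triple loop into O(n*K*log(max(count))) 0/1-knapsack passes.
import Mathlib
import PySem

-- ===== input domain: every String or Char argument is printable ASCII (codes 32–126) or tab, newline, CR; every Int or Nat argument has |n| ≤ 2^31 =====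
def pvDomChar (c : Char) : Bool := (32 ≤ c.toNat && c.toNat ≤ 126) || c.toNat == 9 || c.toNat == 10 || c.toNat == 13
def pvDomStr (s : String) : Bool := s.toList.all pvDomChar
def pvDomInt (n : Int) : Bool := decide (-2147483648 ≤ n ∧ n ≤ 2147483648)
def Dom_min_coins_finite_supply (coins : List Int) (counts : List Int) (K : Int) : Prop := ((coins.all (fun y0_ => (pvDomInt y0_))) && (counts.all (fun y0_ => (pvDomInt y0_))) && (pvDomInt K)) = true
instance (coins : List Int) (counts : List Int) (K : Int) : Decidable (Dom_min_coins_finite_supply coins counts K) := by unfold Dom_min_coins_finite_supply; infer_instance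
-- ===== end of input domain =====

-- B replaces A's per-amount 'used = 1..count' scan by a binary decomposition of each
-- supply into 0/1 pieces (objective: faster — asymptotically fewer inner iterations).


-- ===== PORT A =====
-- dp cells: none = float('inf'), some v = the int v.
-- dp[i] reads/writes: inside Pre_ every access has 0 ≤ i < len dp (an out-of-range access
-- raises IndexError in Python and is excluded by Pre_), so a total getD/set form is exact there.
def pvGet (dp : List (Option Int)) (i : Int) : Option Int := dp.getD i.toNat none
def pvSet (dp : List (Option Int)) (i : Int) (v : Option Int) : List (Option Int) := dp.set i.toNat v
-- min(dp[amount], x) where dp[amount] may be float('inf')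
def pvMin : Option Int → Int → Int
  | none, x => x
  | some w, x => min w x

-- body of 'for used in range(1, count + 1)'
def pvAinner (c a : Int) (dp : List (Option Int)) (u : Int) : List (Option Int) :=
  if u * c ≤ a then                               -- amount >= used * coin
    match pvGet dp (a - u * c) with               -- dp[amount - used*coin] != inf
    | some v => pvSet dp a (some (pvMin (pvGet dp a) (v + u)))
    | none => dp
  else dp

-- body of 'for amount in range(K, -1, -1)'
def pvAamount (c m : Int) (dp : List (Option Int)) (a : Int) : List (Option Int) :=
  (PySem.List.pyRange 1 (m + 1) 1).foldl (pvAinner c a) dp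

-- body of 'for coin, count in zip(coins, counts)'
def pvAitem (K : Int) (dp : List (Option Int)) (cc : Int × Int) : List (Option Int) :=
  (PySem.List.pyRange K (-1) (-1)).foldl (pvAamount cc.1 cc.2) dp

def min_coins_finite_supply (coins : List Int) (counts : List Int) (K : Int) : Int :=
  let dp0 : List (Option Int) := (List.replicate (K + 1).toNat none).set 0 (some 0)
  let dp := (coins.zip counts).foldl (pvAitem K) dp0
  match pvGet dp K with
  | some v => v
  | none => -1

-- ===== PORT B =====
-- binary decomposition of the supply c: pieces 1, 2, 4, …, then the positive rest.
-- Python's 'while p <= c' loop runs with p ≥ 1 always (p starts at 1 and doubles); the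
-- extra '1 ≤ p' conjunct only makes the recursion well-founded and holds on every call.
def pvPieces (p c : Int) : List Int :=
  if 1 ≤ p ∧ p ≤ c then p :: pvPieces (p * 2) (c - p)
  else if 0 < c then [c] else []
termination_by (c + 1 - p).toNat
decreasing_by omega

-- body of 'for amount in range(K, w - 1, -1)'
def pvBamount (w q : Int) (dp : List (Option Int)) (a : Int) : List (Option Int) :=
  match pvGet dp (a - w) with                     -- prev = dp[amount - w]
  | some v =>
    match pvGet dp a with                         -- prev + q < dp[amount] ?
    | some w' => if v + q < w' then pvSet dp a (some (v + q)) else dp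
    | none => pvSet dp a (some (v + q))
  | none => dp

-- body of 'for q in pieces'
def pvBpiece (K c : Int) (dp : List (Option Int)) (q : Int) : List (Option Int) :=
  let w := q * c
  (PySem.List.pyRange K (w - 1) (-1)).foldl (pvBamount w q) dp

-- body of 'for coin, count in zip(coins, counts)'
def pvBitem (K : Int) (dp : List (Option Int)) (cc : Int × Int) : List (Option Int) :=
  (pvPieces 1 cc.2).foldl (pvBpiece K cc.1) dp

def min_coins_finite_supply_alt (coins : List Int) (counts : List Int) (K : Int) : Int :=
  let dp0 : List (Option Int) := (List.replicate (K + 1).toNat none).set 0 (some 0)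
  let dp := (coins.zip counts).foldl (pvBitem K) dp0
  match pvGet dp K with
  | some v => v
  | none => -1

-- ===== PRECONDITION & SPEC =====
-- Pre_ excludes exactly the inputs where A raises IndexError: K < 0 (dp[0] on an empty dp),
-- and a negative coin paired with a count ≥ 1 (dp[amount - used*coin] indexes past the end).
def Pre_min_coins_finite_supply (coins : List Int) (counts : List Int) (K : Int) : Prop :=
  0 ≤ K ∧ ∀ p ∈ coins.zip counts, 0 ≤ p.1 ∨ p.2 < 1
instance (coins : List Int) (counts : List Int) (K : Int) : Decidable (Pre_min_coins_finite_supply coins counts K) := by unfold Pre_min_coins_finite_supply; infer_instance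
def pvWitness_min_coins_finite_supply : List Int × List Int × Int := ([1, 2], [3, 1], 5)

def Spec_min_coins_finite_supply (coins : List Int) (counts : List Int) (K : Int) (out : Int) : Prop := out = min_coins_finite_supply_alt coins counts K
instance (coins : List Int) (counts : List Int) (K : Int) (out : Int) : Decidable (Spec_min_coins_finite_supply coins counts K out) := by unfold Spec_min_coins_finite_supply; infer_instance

-- ===== CLAIM (what is proved, stated in full; the proofs are below) =====
def Claim_equal_min_coins_finite_supply : Prop := ∀ (coins : List Int) (counts : List Int) (K : Int), Dom_min_coins_finite_supply coins counts K → Pre_min_coins_finite_supply coins counts K → Spec_min_coins_finite_supply coins counts K (min_coins_finite_supply coins counts K)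

-- ===== LEMMAS AND PROOFS =====

-- dp cell values in the extended integers: none (= inf) ↦ ⊤
def pvVal : Option Int → WithTop Int
  | none => ⊤
  | some v => (v : WithTop Int)

lemma pvVal_inj {o o' : Option Int} (h : pvVal o = pvVal o') : o = o' := by
  cases o <;> cases o' <;> simp_all [pvVal]

-- the value a dp read yields, as an extended integer
def pvG (dp : List (Option Int)) (i : Int) : WithTop Int := pvVal (pvGet dp i)

lemma pvLength_set (dp : List (Option Int)) (a : Int) (v : Option Int) :
    (pvSet dp a v).length = dp.length := by simp [pvSet]

lemma pvGet_set_self (dp : List (Option Int)) (a : Int) (v : Option Int)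
    (h : a.toNat < dp.length) : pvGet (pvSet dp a v) a = v := by
  simp [pvGet, pvSet, List.getD_eq_getElem?_getD, List.getElem?_set_self h]

lemma pvGet_set_ne (dp : List (Option Int)) (a i : Int) (v : Option Int)
    (h : a.toNat ≠ i.toNat) : pvGet (pvSet dp a v) i = pvGet dp i := by
  simp [pvGet, pvSet, List.getD_eq_getElem?_getD, List.getElem?_set_ne h]

lemma pvSet_get_self (dp : List (Option Int)) (a : Int)
    (h : a.toNat < dp.length) : pvSet dp a (pvGet dp a) = dp := by
  simp [pvGet, pvSet, List.getD_eq_getElem?_getD, List.getElem?_eq_getElem h]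

lemma pvVal_min (r : Option Int) (x : Int) :
    pvVal (some (pvMin r x)) = pvVal r ⊓ (x : WithTop Int) := by
  cases r with
  | none => simp [pvVal, pvMin]
  | some w => simp only [pvMin, pvVal]; exact WithTop.coe_inf w x

lemma pvFoldlId {α β : Type} (l : List β) (f : α → β → α)
    (h : ∀ d b, b ∈ l → f d b = d) (d : α) : l.foldl f d = d := by
  induction l generalizing d with
  | nil => rfl
  | cons b l ih =>
    rw [List.foldl_cons, h d b (by simp)]
    exact ih (fun d b hb => h d b (by simp [hb])) d

lemma pvFoldInf (l : List Int) (f : Option Int → Int → Option Int) (t : Int → WithTop Int)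
    (h : ∀ r u, u ∈ l → pvVal (f r u) = pvVal r ⊓ t u) (r : Option Int) :
    pvVal (l.foldl f r) = pvVal r ⊓ l.toFinset.inf t := by
  induction l generalizing r with
  | nil => simp
  | cons q l ih =>
    rw [List.foldl_cons, ih (fun r u hu => h r u (List.mem_cons_of_mem _ hu)),
      h r q List.mem_cons_self, List.toFinset_cons, Finset.inf_insert, inf_assoc]

lemma pvInfIf (s : Finset Int) (p : Int → Prop) [DecidablePred p] (f : Int → WithTop Int) :
    s.inf (fun u => if p u then f u else ⊤) = (s.filter p).inf f := by
  induction s using Finset.induction_on with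
  | empty => simp
  | insert a s ha ih =>
    rw [Finset.filter_insert]
    by_cases hp : p a <;> simp [Finset.inf_insert, hp, ih]

lemma pvInfAdd (s : Finset Int) (f : Int → WithTop Int) (q : Int) :
    s.inf f + (q : WithTop Int) = s.inf (fun v => f v + (q : WithTop Int)) := by
  induction s using Finset.induction_on with
  | empty => simp
  | insert a s ha ih =>
    rw [Finset.inf_insert, Finset.inf_insert, ← ih]
    exact min_add _ _ _

-- the candidate infimum over a set S of piece-sums
noncomputable def pvInfS (g : Int → WithTop Int) (S : Finset Int) (c j : Int) : WithTop Int :=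
  (S.filter (fun u => u * c ≤ j)).inf (fun u => g (j - u * c) + (u : WithTop Int))

-- the value both per-item passes produce at amount a from the pre-item table g
noncomputable def pvStep (g : Int → WithTop Int) (c m a : Int) : WithTop Int :=
  pvInfS g (Finset.Icc 0 (max m 0)) c a

lemma pvInfS_congr (g g' : Int → WithTop Int) (S : Finset Int) (c j : Int)
    (hc : 0 ≤ c) (hS : ∀ x ∈ S, 0 ≤ x) (h : ∀ i, 0 ≤ i → i ≤ j → g i = g' i) :
    pvInfS g S c j = pvInfS g' S c j := by
  unfold pvInfS
  refine Finset.inf_congr rfl (fun u hu => ?_)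
  rw [Finset.mem_filter] at hu
  rw [h (j - u * c) (by omega) (sub_le_self j (mul_nonneg (hS u hu.1) hc))]

lemma pvInfS_union_image (g : Int → WithTop Int) (S : Finset Int) (c q j : Int)
    (hc : 0 < c) (hS : ∀ x ∈ S, 0 ≤ x) :
    pvInfS g S c j ⊓ (if q * c ≤ j then pvInfS g S c (j - q * c) + (q : WithTop Int) else ⊤)
      = pvInfS g (S ∪ S.image (· + q)) c j := by
  unfold pvInfS
  rw [Finset.filter_union, Finset.inf_union]
  congr 1
  by_cases hqc : q * c ≤ j
  · simp only [hqc, if_true]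
    rw [pvInfAdd, Finset.filter_image, Finset.inf_image]
    refine Finset.inf_congr (Finset.filter_congr (fun v _ => ?_)) (fun v hv => ?_)
    · rw [show (v + q) * c = v * c + q * c from by ring]
      omega
    · show g (j - q * c - v * c) + (v : WithTop Int) + (q : WithTop Int)
        = g (j - (v + q) * c) + ((v + q : Int) : WithTop Int)
      rw [show j - q * c - v * c = j - (v + q) * c from by ring, WithTop.coe_add, add_assoc]
  · simp only [hqc, if_false]
    have hempty : (S.image (· + q)).filter (fun u => u * c ≤ j) = ∅ := by
      rw [Finset.eq_empty_iff_forall_notMem]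
      intro u hu
      rw [Finset.mem_filter, Finset.mem_image] at hu
      obtain ⟨⟨x, hx, rfl⟩, hle⟩ := hu
      have hx0 : 0 ≤ x := hS x hx
      have : q * c ≤ (x + q) * c := by nlinarith
      omega
    rw [hempty]
    simp

-- ---- the A-side per-item pass computes pvStep ----

-- value of A's inner 'used' loop at a fixed amount, as a fold over cell values
def pvAcellstep (dp : List (Option Int)) (c a : Int) (r : Option Int) (u : Int) : Option Int :=
  if u * c ≤ a then
    match pvGet dp (a - u * c) with
    | some v => some (pvMin r (v + u))
    | none => r
  else r

noncomputable def pvATerm (dp : List (Option Int)) (c a u : Int) : WithTop Int :=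
  if u * c ≤ a then pvG dp (a - u * c) + (u : WithTop Int) else ⊤

lemma pvAcellstep_val (dp : List (Option Int)) (c a : Int) (r : Option Int) (u : Int) :
    pvVal (pvAcellstep dp c a r u) = pvVal r ⊓ pvATerm dp c a u := by
  unfold pvAcellstep pvATerm pvG
  by_cases hg : u * c ≤ a
  · simp only [hg, if_true]
    cases pvGet dp (a - u * c) with
    | none => simp [pvVal]
    | some v => rw [pvVal_min, WithTop.coe_add]; simp [pvVal]
  · simp [hg]

lemma pvToFinset_pyRange (m : Int) :
    (PySem.List.pyRange 1 (m + 1) 1).toFinset = Finset.Icc 1 m := by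
  ext x
  rw [List.mem_toFinset, PySem.List.mem_pyRange_one, Finset.mem_Icc]
  omega

lemma pvIcc_insert (m : Int) : Finset.Icc 0 (max m 0) = insert 0 (Finset.Icc 1 m) := by
  ext x
  rw [Finset.mem_Icc, Finset.mem_insert, Finset.mem_Icc]
  omega

lemma pvAamount_main (dp : List (Option Int)) (c m a : Int)
    (hc : 0 < c) (ha : 0 ≤ a) (hlen : a.toNat < dp.length) :
    pvAamount c m dp a
      = pvSet dp a ((PySem.List.pyRange 1 (m + 1) 1).foldl (pvAcellstep dp c a) (pvGet dp a)) := by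
  have key : ∀ l : List Int, (∀ u ∈ l, 1 ≤ u) → ∀ r,
      l.foldl (pvAinner c a) (pvSet dp a r) = pvSet dp a (l.foldl (pvAcellstep dp c a) r) := by
    intro l
    induction l with
    | nil => intro _ r; rfl
    | cons u l ih =>
      intro hl r
      have hu : 1 ≤ u := hl u (by simp)
      rw [List.foldl_cons, List.foldl_cons]
      have hstep : pvAinner c a (pvSet dp a r) u = pvSet dp a (pvAcellstep dp c a r u) := by
        unfold pvAinner pvAcellstep
        by_cases hg : u * c ≤ a
        · have huc : 1 ≤ u * c := by nlinarith
          have hne : a.toNat ≠ (a - u * c).toNat := by omega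
          simp only [hg, if_true]
          rw [pvGet_set_ne dp a (a - u * c) r hne]
          cases pvGet dp (a - u * c) with
          | none => rfl
          | some v =>
            rw [pvGet_set_self dp a r hlen]
            simp [pvSet, List.set_set]
        · simp [hg]
      rw [hstep]
      exact ih (fun d hb => hl d (by simp [hb])) _
  have h0 := key (PySem.List.pyRange 1 (m + 1) 1)
      (fun u hu => (PySem.List.mem_pyRange_one.mp hu).1) (pvGet dp a)
  rw [pvSet_get_self dp a hlen] at h0
  exact h0

lemma pvAamount_val (dp : List (Option Int)) (c m a : Int) (ha : 0 ≤ a) :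
    pvVal ((PySem.List.pyRange 1 (m + 1) 1).foldl (pvAcellstep dp c a) (pvGet dp a))
      = pvStep (pvG dp) c m a := by
  rw [pvFoldInf _ _ (pvATerm dp c a) (fun r u _ => pvAcellstep_val dp c a r u),
    pvToFinset_pyRange]
  unfold pvStep pvInfS pvATerm
  rw [pvInfIf, pvIcc_insert, Finset.filter_insert]
  have h0 : (0 : Int) * c ≤ a := by simpa using ha
  rw [if_pos h0, Finset.inf_insert]
  show pvG dp a ⊓ _ = (pvG dp (a - 0 * c) + ((0 : Int) : WithTop Int)) ⊓ _
  norm_num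

-- ---- generic descending amount loop ----
lemma pvDescLoop (body : List (Option Int) → Int → List (Option Int)) (tgt : Int → WithTop Int)
    (dp : List (Option Int)) (K lo : Int) (hlo : -1 ≤ lo) (hKlen : K < (dp.length : Int))
    (hbody : ∀ dp' a, lo < a → a ≤ K → dp'.length = dp.length →
        (∀ j, 0 ≤ j → j ≤ a → pvG dp' j = pvG dp j) →
        ∃ cell, body dp' a = pvSet dp' a cell ∧ pvVal cell = tgt a) :
    (((PySem.List.pyRange K lo (-1)).foldl body dp).length = dp.length) ∧
    (∀ j, 0 ≤ j → j ≤ lo → pvG ((PySem.List.pyRange K lo (-1)).foldl body dp) j = pvG dp j) ∧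
    (∀ j, lo < j → j ≤ K → pvG ((PySem.List.pyRange K lo (-1)).foldl body dp) j = tgt j) ∧
    (∀ j, K < j → pvG ((PySem.List.pyRange K lo (-1)).foldl body dp) j = pvG dp j) := by
  have main : ∀ n : ℕ, ∀ t : Int, (t - lo).toNat = n → lo ≤ t → t ≤ K → ∀ dp',
      dp'.length = dp.length →
      (∀ j, 0 ≤ j → j ≤ t → pvG dp' j = pvG dp j) →
      (∀ j, t < j → j ≤ K → pvG dp' j = tgt j) →
      (∀ j, K < j → pvG dp' j = pvG dp j) →
      (((PySem.List.pyRange t lo (-1)).foldl body dp').length = dp.length) ∧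
      (∀ j, 0 ≤ j → j ≤ lo → pvG ((PySem.List.pyRange t lo (-1)).foldl body dp') j = pvG dp j) ∧
      (∀ j, lo < j → j ≤ K → pvG ((PySem.List.pyRange t lo (-1)).foldl body dp') j = tgt j) ∧
      (∀ j, K < j → pvG ((PySem.List.pyRange t lo (-1)).foldl body dp') j = pvG dp j) := by
    intro n
    induction n with
    | zero =>
      intro t hn hlot htK dp' hlen h1 h2 h3
      have ht : t = lo := by omega
      subst ht
      rw [PySem.List.pyRange_neg_one_eq_nil le_rfl, List.foldl_nil]
      exact ⟨hlen, fun j hj hjlo => h1 j hj (by omega), h2, h3⟩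
    | succ n ih =>
      intro t hn hlot htK dp' hlen h1 h2 h3
      have hlt : lo < t := by omega
      have ht0 : 0 ≤ t := by omega
      have htlen : t.toNat < dp'.length := by omega
      rw [PySem.List.pyRange_neg_one_cons hlt, List.foldl_cons]
      obtain ⟨cell, hb, hcell⟩ := hbody dp' t hlt htK hlen (fun j hj hjt => h1 j hj hjt)
      rw [hb]
      refine ih (t - 1) (by omega) (by omega) (by omega) _ (by rw [pvLength_set]; exact hlen)
        ?_ ?_ ?_
      · intro j hj hjt
        rw [pvG, pvGet_set_ne dp' t j cell (by omega), ← pvG]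
        exact h1 j hj (by omega)
      · intro j hjt hjK
        by_cases hj : j = t
        · subst hj
          rw [pvG, pvGet_set_self dp' j cell htlen]
          exact hcell
        · rw [pvG, pvGet_set_ne dp' t j cell (by omega), ← pvG]
          exact h2 j (by omega) hjK
      · intro j hjK
        rw [pvG, pvGet_set_ne dp' t j cell (by omega), ← pvG]
        exact h3 j hjK
  by_cases hK : lo ≤ K
  · exact main (K - lo).toNat K rfl hK le_rfl dp rfl (fun _ _ _ => rfl)
      (fun j h1 h2 => absurd h1 (by omega)) (fun _ _ => rfl)
  · rw [PySem.List.pyRange_neg_one_eq_nil (by omega), List.foldl_nil]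
    exact ⟨rfl, fun _ _ _ => rfl, fun j h1 h2 => absurd h1 (by omega), fun _ _ => rfl⟩

-- ---- A per item, main case ----
lemma pvAitem_eq (K c m : Int) (hc : 0 < c) (dp : List (Option Int))
    (hKlen : K < (dp.length : Int)) :
    ((pvAitem K dp (c, m)).length = dp.length) ∧
    (∀ j, 0 ≤ j → j ≤ K → pvG (pvAitem K dp (c, m)) j = pvStep (pvG dp) c m j) ∧
    (∀ j, K < j → pvG (pvAitem K dp (c, m)) j = pvG dp j) := by
  have h := pvDescLoop (pvAamount c m) (pvStep (pvG dp) c m) dp K (-1) le_rfl hKlen ?_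
  · exact ⟨h.1, fun j hj hjK => h.2.2.1 j (by omega) hjK, h.2.2.2⟩
  · intro dp' a ha haK hlen hagree
    have ha0 : 0 ≤ a := by omega
    have halen : a.toNat < dp'.length := by omega
    refine ⟨(PySem.List.pyRange 1 (m + 1) 1).foldl (pvAcellstep dp' c a) (pvGet dp' a),
      pvAamount_main dp' c m a hc ha0 halen, ?_⟩
    rw [pvAamount_val dp' c m a ha0]
    exact pvInfS_congr (pvG dp') (pvG dp) _ c a (le_of_lt hc)
      (fun x hx => (Finset.mem_Icc.mp hx).1) hagree

-- ---- B per piece ----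
lemma pvBamount_cell (dp' : List (Option Int)) (w q a : Int)
    (_hwa : w ≤ a) (hlen' : a.toNat < dp'.length) :
    ∃ cell, pvBamount w q dp' a = pvSet dp' a cell ∧
      pvVal cell = pvG dp' a ⊓ (pvG dp' (a - w) + (q : WithTop Int)) := by
  unfold pvBamount
  cases h1 : pvGet dp' (a - w) with
  | none =>
    refine ⟨pvGet dp' a, (pvSet_get_self dp' a hlen').symm, ?_⟩
    rw [pvG, pvG, h1]
    simp [pvVal]
  | some v =>
    cases h2 : pvGet dp' a with
    | none =>
      refine ⟨some (v + q), rfl, ?_⟩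
      rw [pvG, pvG, h1, h2]
      simp [pvVal, WithTop.coe_add]
    | some w' =>
      rw [pvG, pvG, h1, h2]
      refine ⟨if v + q < w' then some (v + q) else some w', ?_, ?_⟩
      · show (if v + q < w' then pvSet dp' a (some (v + q)) else dp') = _
        by_cases hlt : v + q < w'
        · rw [if_pos hlt, if_pos hlt]
        · rw [if_neg hlt, if_neg hlt, ← h2, pvSet_get_self dp' a hlen']
      · by_cases hlt : v + q < w'
        · rw [if_pos hlt]
          show ((v + q : Int) : WithTop Int)
            = ((w' : Int) : WithTop Int) ⊓ (((v : Int) : WithTop Int) + ((q : Int) : WithTop Int))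
          rw [← WithTop.coe_add, ← WithTop.coe_inf, WithTop.coe_eq_coe]
          omega
        · rw [if_neg hlt]
          show ((w' : Int) : WithTop Int)
            = ((w' : Int) : WithTop Int) ⊓ (((v : Int) : WithTop Int) + ((q : Int) : WithTop Int))
          rw [← WithTop.coe_add, ← WithTop.coe_inf, WithTop.coe_eq_coe]
          omega

noncomputable def pvBTerm (dp : List (Option Int)) (w q j : Int) : WithTop Int :=
  if w ≤ j then pvG dp (j - w) + (q : WithTop Int) else ⊤

lemma pvBpiece_val (dp : List (Option Int)) (K c q : Int) (hc : 0 < c) (hq : 1 ≤ q)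
    (hKlen : K < (dp.length : Int)) :
    ((pvBpiece K c dp q).length = dp.length) ∧
    (∀ j, 0 ≤ j → j ≤ K → pvG (pvBpiece K c dp q) j = pvG dp j ⊓ pvBTerm dp (q * c) q j) ∧
    (∀ j, K < j → pvG (pvBpiece K c dp q) j = pvG dp j) := by
  have hw : 1 ≤ q * c := by nlinarith
  by_cases hKw : q * c ≤ K
  · have h := pvDescLoop (pvBamount (q * c) q)
        (fun a => pvG dp a ⊓ (pvG dp (a - q * c) + (q : WithTop Int)))
        dp K (q * c - 1) (by omega) hKlen ?_
    · refine ⟨h.1, fun j hj hjK => ?_, h.2.2.2⟩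
      unfold pvBTerm
      by_cases hjw : q * c ≤ j
      · rw [if_pos hjw]
        exact h.2.2.1 j (by omega) hjK
      · rw [if_neg hjw, inf_top_eq]
        exact h.2.1 j hj (by omega)
    · intro dp' a ha haK hlen hagree
      obtain ⟨cell, hb, hcell⟩ := pvBamount_cell dp' (q * c) q a (by omega) (by omega)
      refine ⟨cell, hb, ?_⟩
      rw [hcell, hagree a (by omega) le_rfl, hagree (a - q * c) (by omega) (by omega)]
  · have hnil : PySem.List.pyRange K (q * c - 1) (-1) = [] :=
      PySem.List.pyRange_neg_one_eq_nil (by omega)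
    refine ⟨?_, ?_, ?_⟩
    · show ((PySem.List.pyRange K (q * c - 1) (-1)).foldl (pvBamount (q * c) q) dp).length = dp.length
      rw [hnil]
      rfl
    · intro j hj hjK
      show pvG ((PySem.List.pyRange K (q * c - 1) (-1)).foldl (pvBamount (q * c) q) dp) j = _
      rw [hnil]
      unfold pvBTerm
      rw [if_neg (by omega), List.foldl_nil, inf_top_eq]
    · intro j hjK
      show pvG ((PySem.List.pyRange K (q * c - 1) (-1)).foldl (pvBamount (q * c) q) dp) j = pvG dp j
      rw [hnil]
      rfl

-- ---- subset sums of the pieces ----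
def pvSums (S : Finset Int) (L : List Int) : Finset Int :=
  L.foldl (fun S q => S ∪ S.image (· + q)) S

lemma pvSums_nil (S : Finset Int) : pvSums S [] = S := rfl

lemma pvSums_cons (S : Finset Int) (q : Int) (L : List Int) :
    pvSums S (q :: L) = pvSums (S ∪ S.image (· + q)) L := rfl

lemma pvSums_union (S T : Finset Int) (L : List Int) :
    pvSums (S ∪ T) L = pvSums S L ∪ pvSums T L := by
  induction L generalizing S T with
  | nil => rfl
  | cons q L ih =>
    rw [pvSums_cons, pvSums_cons, pvSums_cons, ← ih]
    congr 1
    ext x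
    simp only [Finset.mem_union, Finset.mem_image]
    aesop

lemma pvSums_image (S : Finset Int) (p : Int) (L : List Int) :
    pvSums (S.image (· + p)) L = (pvSums S L).image (· + p) := by
  induction L generalizing S with
  | nil => rfl
  | cons q L ih =>
    rw [pvSums_cons, pvSums_cons, ← ih]
    congr 1
    rw [Finset.image_union, Finset.image_image, Finset.image_image]
    congr 1
    refine Finset.image_congr fun x _ => ?_
    show x + p + q = x + q + p
    ring

lemma pvPieces_pos (p c : Int) (hp : 1 ≤ p) : ∀ q ∈ pvPieces p c, 1 ≤ q := by
  induction p, c using pvPieces.induct with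
  | case1 p c h ih =>
    rw [pvPieces, if_pos h]
    intro q hq
    rcases List.mem_cons.mp hq with rfl | hq
    · omega
    · exact ih (by omega) q hq
  | case2 p c h h2 =>
    rw [pvPieces, if_neg h, if_pos h2]
    intro q hq
    simp at hq
    omega
  | case3 p c h h2 =>
    rw [pvPieces, if_neg h, if_neg h2]
    simp

lemma pvSums_pieces_split (p c : Int) (h : 1 ≤ p ∧ p ≤ c) :
    pvSums {0} (pvPieces p c)
      = pvSums {0} (pvPieces (p * 2) (c - p))
        ∪ (pvSums {0} (pvPieces (p * 2) (c - p))).image (· + p) := by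
  rw [pvPieces, if_pos h, pvSums_cons, pvSums_union, pvSums_image]

lemma pvSums_pieces_base (c : Int) :
    pvSums ({0} : Finset Int) [c] = {0} ∪ ({0} : Finset Int).image (· + c) := by
  rw [pvSums_cons, pvSums_nil]

lemma pvSums_pieces_bound (p c : Int) (hp : 1 ≤ p) :
    ∀ x ∈ pvSums {0} (pvPieces p c), 0 ≤ x ∧ x ≤ max c 0 := by
  induction p, c using pvPieces.induct with
  | case1 p c h ih =>
    rw [pvSums_pieces_split p c h]
    intro x hx
    rcases Finset.mem_union.mp hx with hx | hx
    · have := ih (by omega) x hx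
      omega
    · obtain ⟨y, hy, rfl⟩ := Finset.mem_image.mp hx
      have := ih (by omega) y hy
      omega
  | case2 p c h h2 =>
    rw [pvPieces, if_neg h, if_pos h2, pvSums_pieces_base]
    intro x hx
    simp only [Finset.mem_union, Finset.mem_image, Finset.mem_singleton] at hx
    rcases hx with rfl | ⟨y, rfl, rfl⟩ <;> omega
  | case3 p c h h2 =>
    rw [pvPieces, if_neg h, if_neg h2]
    intro x hx
    simp only [pvSums_nil, Finset.mem_singleton] at hx
    omega

lemma pvSums_pieces_reach (p c : Int) (hp : 1 ≤ p) :
    ∀ u, 0 ≤ u → u ≤ max c 0 + (p - 1) →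
      ∃ s ∈ pvSums {0} (pvPieces p c), s ≤ u ∧ u - s ≤ p - 1 := by
  induction p, c using pvPieces.induct with
  | case1 p c h ih =>
    intro u hu0 hub
    obtain ⟨s, hs, hs1, hs2⟩ := ih (by omega) u hu0 (by omega)
    rw [pvSums_pieces_split p c h]
    by_cases hcase : u - s ≤ p - 1
    · exact ⟨s, Finset.mem_union_left _ hs, hs1, hcase⟩
    · refine ⟨s + p, Finset.mem_union_right _ (Finset.mem_image_of_mem _ hs), by omega, by omega⟩
  | case2 p c h h2 =>
    intro u hu0 hub
    rw [pvPieces, if_neg h, if_pos h2, pvSums_pieces_base]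
    by_cases hcase : u ≤ p - 1
    · exact ⟨0, by simp, by omega, by omega⟩
    · refine ⟨c, by simp, by omega, by omega⟩
  | case3 p c h h2 =>
    intro u hu0 hub
    rw [pvPieces, if_neg h, if_neg h2]
    exact ⟨0, by simp [pvSums_nil], by omega, by omega⟩

lemma pvSums_pieces (m : Int) : pvSums {0} (pvPieces 1 m) = Finset.Icc 0 (max m 0) := by
  ext u
  rw [Finset.mem_Icc]
  constructor
  · exact fun hu => pvSums_pieces_bound 1 m le_rfl u hu
  · intro hu
    obtain ⟨s, hs, h1, h2⟩ := pvSums_pieces_reach 1 m le_rfl u hu.1 (by omega)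
    have hsu : s = u := by omega
    rw [← hsu]
    exact hs

-- ---- B per item: fold over the pieces accumulates subset sums ----
lemma pvBfold_main (K c : Int) (hc : 0 < c) (dp0 : List (Option Int))
    (hKlen : K < (dp0.length : Int)) :
    ∀ (L : List Int), (∀ q ∈ L, 1 ≤ q) → ∀ (dp' : List (Option Int)) (S : Finset Int),
      dp'.length = dp0.length → (∀ x ∈ S, 0 ≤ x) →
      (∀ j, 0 ≤ j → j ≤ K → pvG dp' j = pvInfS (pvG dp0) S c j) →
      (∀ j, K < j → pvG dp' j = pvG dp0 j) →
      ((L.foldl (pvBpiece K c) dp').length = dp0.length) ∧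
      (∀ j, 0 ≤ j → j ≤ K →
        pvG (L.foldl (pvBpiece K c) dp') j = pvInfS (pvG dp0) (pvSums S L) c j) ∧
      (∀ j, K < j → pvG (L.foldl (pvBpiece K c) dp') j = pvG dp0 j) := by
  intro L
  induction L with
  | nil => exact fun _ dp' S h1 _ h3 h4 => ⟨h1, h3, h4⟩
  | cons q L ih =>
    intro hL dp' S hlen hS h3 h4
    have hq : 1 ≤ q := hL q (by simp)
    rw [List.foldl_cons, pvSums_cons]
    have hKlen' : K < (dp'.length : Int) := by rw [hlen]; exact hKlen
    obtain ⟨hl1, hl2, hl3⟩ := pvBpiece_val dp' K c q hc hq hKlen'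
    refine ih (fun p hp => hL p (by simp [hp])) _ (S ∪ S.image (· + q))
      (by rw [hl1, hlen]) ?_ ?_ ?_
    · intro x hx
      rcases Finset.mem_union.mp hx with hx | hx
      · exact hS x hx
      · obtain ⟨y, hy, rfl⟩ := Finset.mem_image.mp hx
        have := hS y hy
        omega
    · intro j hj hjK
      rw [hl2 j hj hjK, h3 j hj hjK]
      unfold pvBTerm
      have hw : (1 : Int) ≤ q * c := by nlinarith
      by_cases hjw : q * c ≤ j
      · rw [if_pos hjw, h3 (j - q * c) (by omega) (by omega)]
        have hkey := pvInfS_union_image (pvG dp0) S c q j hc hS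
        rw [if_pos hjw] at hkey
        exact hkey
      · rw [if_neg hjw]
        have hkey := pvInfS_union_image (pvG dp0) S c q j hc hS
        rw [if_neg hjw] at hkey
        exact hkey
    · intro j hjK
      rw [hl3 j hjK]
      exact h4 j hjK

-- equality of dp tables from equality of all reads
lemma pvListEq (R R' : List (Option Int)) (hlen : R.length = R'.length)
    (h : ∀ j : Int, 0 ≤ j → j < (R.length : Int) → pvG R j = pvG R' j) : R = R' := by
  apply List.ext_getElem hlen
  intro n h1 h2
  have hh := h n (by positivity) (by exact_mod_cast h1)
  rw [pvG, pvG, pvGet, pvGet] at hh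
  simp only [Int.toNat_natCast, List.getD_eq_getElem?_getD, List.getElem?_eq_getElem h1,
    List.getElem?_eq_getElem h2, Option.getD_some] at hh
  exact pvVal_inj hh

-- a successful read is an in-range read
lemma pvGet_some_lt (dp : List (Option Int)) (i : Int) (v : Int)
    (h : pvGet dp i = some v) : i.toNat < dp.length := by
  by_contra hcon
  rw [pvGet, List.getD_eq_getElem?_getD, List.getElem?_eq_none (by omega)] at h
  simp at h

-- ---- the two per-item passes coincide ----
lemma pvItem_eq (K : Int) (hK : 0 ≤ K) (cc : Int × Int) (hcc : 0 ≤ cc.1 ∨ cc.2 < 1)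
    (dp : List (Option Int)) (hlen : dp.length = (K + 1).toNat) :
    pvAitem K dp cc = pvBitem K dp cc ∧ (pvAitem K dp cc).length = dp.length := by
  obtain ⟨c, m⟩ := cc
  by_cases hm : m < 1
  · -- empty supply: both passes do nothing
    have hA : pvAitem K dp (c, m) = dp := by
      unfold pvAitem
      refine pvFoldlId _ _ (fun d a _ => ?_) dp
      unfold pvAamount
      rw [PySem.List.pyRange_one_eq_nil (by omega), List.foldl_nil]
    have hB : pvBitem K dp (c, m) = dp := by
      unfold pvBitem
      rw [pvPieces, if_neg (by omega), if_neg (by omega), List.foldl_nil]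
    rw [hA, hB]
    exact ⟨rfl, rfl⟩
  · replace hcc : 0 ≤ c := by omega
    rcases eq_or_lt_of_le hcc with hc0 | hcpos
    · -- coin value 0: every update is a no-op in both passes
      have hA : pvAitem K dp (c, m) = dp := by
        unfold pvAitem
        refine pvFoldlId _ _ (fun d a ha => ?_) dp
        have ha0 : 0 ≤ a := by
          have := PySem.List.mem_pyRange_neg_one.mp ha
          omega
        unfold pvAamount
        refine pvFoldlId _ _ (fun d' u hu => ?_) d
        unfold pvAinner
        rw [← hc0]
        simp only [mul_zero, sub_zero]
        rw [if_pos ha0]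
        cases hget : pvGet d' a with
        | none => rfl
        | some v =>
          have hu1 : 1 ≤ u := (PySem.List.mem_pyRange_one.mp hu).1
          have hlt := pvGet_some_lt d' a v hget
          show pvSet d' a (some (pvMin (some v) (v + u))) = d'
          rw [show pvMin (some v) (v + u) = v from by simp [pvMin]; omega, ← hget,
            pvSet_get_self d' a hlt]
      have hB : pvBitem K dp (c, m) = dp := by
        unfold pvBitem
        refine pvFoldlId _ _ (fun d q hq => ?_) dp
        have hq1 : 1 ≤ q := pvPieces_pos 1 m le_rfl q hq
        show (PySem.List.pyRange K (q * c - 1) (-1)).foldl (pvBamount (q * c) q) d = d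
        rw [← hc0]
        simp only [mul_zero]
        refine pvFoldlId _ _ (fun d' a _ => ?_) d
        unfold pvBamount
        simp only [sub_zero]
        cases hget : pvGet d' a with
        | none => rfl
        | some v =>
          show (if v + q < v then pvSet d' a (some (v + q)) else d') = d'
          rw [if_neg (by omega)]
      rw [hA, hB]
      exact ⟨rfl, rfl⟩
    · -- main case: both passes produce pvStep
      have hKlen : K < (dp.length : Int) := by
        rw [hlen]
        omega
      obtain ⟨ha1, ha2, ha3⟩ := pvAitem_eq K c m hcpos dp hKlen
      have hbase : ∀ j : Int, 0 ≤ j → j ≤ K → pvG dp j = pvInfS (pvG dp) {0} c j := by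
        intro j hj hjK
        unfold pvInfS
        rw [Finset.filter_singleton, if_pos (by simpa using hj), Finset.inf_singleton]
        norm_num
      obtain ⟨hb1, hb2, hb3⟩ := pvBfold_main K c hcpos dp hKlen (pvPieces 1 m)
        (pvPieces_pos 1 m le_rfl) dp {0} rfl (by simp) hbase (fun _ _ => rfl)
      have hBdef : pvBitem K dp (c, m) = (pvPieces 1 m).foldl (pvBpiece K c) dp := rfl
      have hAB : pvAitem K dp (c, m) = pvBitem K dp (c, m) := by
        refine pvListEq _ _ (by rw [ha1, hBdef, hb1]) (fun j hj hjlen => ?_)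
        have hjK : j ≤ K := by
          rw [ha1, hlen] at hjlen
          omega
        rw [ha2 j hj hjK, hBdef, hb2 j hj hjK, pvSums_pieces, pvStep]
      exact ⟨hAB, ha1⟩

lemma pvFoldItems (K : Int) (hK : 0 ≤ K) :
    ∀ (items : List (Int × Int)) (dp : List (Option Int)), dp.length = (K + 1).toNat →
      (∀ p ∈ items, 0 ≤ p.1 ∨ p.2 < 1) →
      items.foldl (pvAitem K) dp = items.foldl (pvBitem K) dp := by
  intro items
  induction items with
  | nil => exact fun _ _ _ => rfl
  | cons cc items ih =>
    intro dp hlen hall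
    rw [List.foldl_cons, List.foldl_cons]
    obtain ⟨heq, hl⟩ := pvItem_eq K hK cc (hall cc (by simp)) dp hlen
    rw [← heq]
    exact ih (pvAitem K dp cc) (by rw [hl, hlen]) (fun p hp => hall p (by simp [hp]))

-- ===== VERDICT (by name: the statement is the Claim_ definition above) =====
theorem min_coins_finite_supply_spec : Claim_equal_min_coins_finite_supply := by
  intro coins counts K _ hpre
  obtain ⟨hK, hitems⟩ := hpre
  unfold Spec_min_coins_finite_supply min_coins_finite_supply min_coins_finite_supply_alt
  show (match pvGet ((coins.zip counts).foldl (pvAitem K)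
      ((List.replicate (K + 1).toNat none).set 0 (some 0))) K with
    | some v => v | none => -1)
    = (match pvGet ((coins.zip counts).foldl (pvBitem K)
      ((List.replicate (K + 1).toNat none).set 0 (some 0))) K with
    | some v => v | none => -1)
  rw [pvFoldItems K hK (coins.zip counts) _ (by simp) hitems]
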